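-- pv_equiv track=rewrite | github.com/hidenorly/gerrit-util | gerrit_merge_conflict_solver2.py | _check_valid_merge_conflict_resolution
-- ===== SOURCE A (Python) =====
-- def _check_valid_merge_conflict_resolution(lines, is_fallback=True):
--     if not lines:
--         return False
--
--     _lines = lines.split('\n')
--
--     check_items = {
--         '<<<<<<< ': False,
--         '=======': False,
--         '>>>>>>> ': False
--     }
--     # check -<<<<<<<, -======= and ->>>>>>> are included as diff
--     for line in _lines:
--         line = line.strip()
--         for key, status in check_items.items():
--             if not status and line.startswith("-") and line[1:].strip().startswith(key):
--                 check_items[key] = True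
--                 break
--         isAllFound = True
--         for status in check_items.values():
--             isAllFound = isAllFound and status
--         if isAllFound:
--             return True
--
--     # check the given lines do NOT include any <<<<<<<, ======= and >>>>>>>
--     if is_fallback:
--         for key in check_items.keys():
--             if key in lines:
--                 return False
--         return True
--
--     return False
-- ===== SOURCE B (Python) =====
-- def _check_valid_merge_conflict_resolution(lines, is_fallback=True):
--     if not lines:
--         return False
--
--     markers = ('<<<<<<< ', '=======', '>>>>>>> ')
--     _lines = lines.split('\n')
--
--     def removed(line, m):
--         s = line.strip()
--         return s.startswith('-') and s[1:].strip().startswith(m)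
--
--     if all(any(removed(line, m) for line in _lines) for m in markers):
--         return True
--
--     if is_fallback:
--         return not any(m in lines for m in markers)
--
--     return False
-- ===== Notes on version B (the rewrite author's own statement) =====
-- stated objective: simpler
-- what changed: Replaces the stateful single-pass dict loop (with per-line all-found rechecks, inner break and mutation) by a declarative all/any check: one independent scan per marker; the fallback becomes a single not-any expression.
import Mathlib
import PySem

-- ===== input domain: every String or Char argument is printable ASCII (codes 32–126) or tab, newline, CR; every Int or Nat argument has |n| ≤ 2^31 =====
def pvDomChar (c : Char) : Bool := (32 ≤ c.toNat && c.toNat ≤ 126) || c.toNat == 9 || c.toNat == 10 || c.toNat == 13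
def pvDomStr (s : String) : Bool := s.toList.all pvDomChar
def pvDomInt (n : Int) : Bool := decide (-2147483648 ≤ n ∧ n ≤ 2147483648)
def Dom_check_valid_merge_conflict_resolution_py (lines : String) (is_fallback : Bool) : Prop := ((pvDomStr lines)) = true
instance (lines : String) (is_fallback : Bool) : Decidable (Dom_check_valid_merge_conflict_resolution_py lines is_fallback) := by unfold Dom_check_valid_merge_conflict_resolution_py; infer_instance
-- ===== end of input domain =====

-- B replaces A's stateful dict loop by a declarative all/any check per marker (objective: simpler).

-- ===== PORT A =====
-- the three conflict-marker keys, in A's dict order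
def pvK1 : String := "<<<<<<< "
def pvK2 : String := "======="
def pvK3 : String := ">>>>>>> "

-- 'line.startswith("-") and line[1:].strip().startswith(key)' (line already stripped by the caller)
def pvCond (key line : String) : Bool :=
  PySem.Str.startswith line "-" &&
    PySem.Str.startswith (PySem.Str.strip (PySem.Str.slice line (some 1) none)) key

-- the inner 'for key, status in check_items.items(): … break' loop
def pvInnerAux (d : PySem.Dict String Bool) (line : String) :
    List (String × Bool) → PySem.Dict String Bool
  | [] => d
  | (key, status) :: rest =>
      if !status && pvCond key line then d.insert key true
      else pvInnerAux d line rest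

-- 'isAllFound = True; for status in check_items.values(): isAllFound = isAllFound and status'
def pvAllFound (d : PySem.Dict String Bool) : Bool :=
  d.values.foldl (fun acc status => acc && status) true

-- the fallback loop 'for key in check_items.keys(): if key in lines: return False / return True'
def pvFallbackA (lines0 : String) : List String → Bool
  | [] => true
  | key :: rest => if PySem.Str.isIn key lines0 then false else pvFallbackA lines0 rest

-- the main 'for line in _lines' loop, with the early 'return True' and the code after the loop
def pvLoopA (lines0 : String) (is_fallback : Bool) :
    List String → PySem.Dict String Bool → Bool
  | [], d => if is_fallback then pvFallbackA lines0 d.keys else false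
  | l :: rest, d =>
      let line := PySem.Str.strip l
      let d' := pvInnerAux d line d.items
      if pvAllFound d' then true else pvLoopA lines0 is_fallback rest d'

def check_valid_merge_conflict_resolution_py (lines : String) (is_fallback : Bool) : Bool :=
  if lines == "" then false
  else
    pvLoopA lines is_fallback ((PySem.Str.split? lines "\n").getD [])
      (PySem.Dict.mk [(pvK1, false), (pvK2, false), (pvK3, false)])

-- ===== PORT B =====
-- 'removed(line, m)' from Source B: s = line.strip(); s.startswith('-') and s[1:].strip().startswith(m)
def pvRemoved (line m : String) : Bool := pvCond m (PySem.Str.strip line)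

def check_valid_merge_conflict_resolution_py_alt (lines : String) (is_fallback : Bool) : Bool :=
  if lines == "" then false
  else
    let markers := [pvK1, pvK2, pvK3]
    let ls := (PySem.Str.split? lines "\n").getD []
    if markers.all (fun m => ls.any (fun line => pvRemoved line m)) then true
    else if is_fallback then !(markers.any (fun m => PySem.Str.isIn m lines)) else false

-- ===== PRECONDITION & SPEC =====
def Spec_check_valid_merge_conflict_resolution_py (lines : String) (is_fallback : Bool) (out : Bool) : Prop := out = check_valid_merge_conflict_resolution_py_alt lines is_fallback
instance (lines : String) (is_fallback : Bool) (out : Bool) : Decidable (Spec_check_valid_merge_conflict_resolution_py lines is_fallback out) := by unfold Spec_check_valid_merge_conflict_resolution_py; infer_instance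

-- ===== CLAIM (what is proved, stated in full; the proofs are below) =====
def Claim_equal_check_valid_merge_conflict_resolution_py : Prop := ∀ (lines : String) (is_fallback : Bool), Dom_check_valid_merge_conflict_resolution_py lines is_fallback → Spec_check_valid_merge_conflict_resolution_py lines is_fallback (check_valid_merge_conflict_resolution_py lines is_fallback)

-- ===== LEMMAS AND PROOFS =====

-- reachable dict states: the three fixed keys with boolean statuses
def pvD (b1 b2 b3 : Bool) : PySem.Dict String Bool :=
  PySem.Dict.mk [(pvK1, b1), (pvK2, b2), (pvK3, b3)]

-- a string starting with marker k starts with k's first character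
lemma pv_head (t k : String) (c : Char) (hk : k.toList.head? = some c)
    (h : PySem.Str.startswith t k = true) : t.toList.head? = some c := by
  rw [PySem.Str.startswith_eq, PySem.Chars.startswith_iff] at h
  rcases h with ⟨u, hu⟩
  rw [← hu, List.head?_append, hk]
  rfl

-- mutual exclusivity: a line matches at most one marker (their first characters differ)
lemma pvCond_pair (k k' line : String) (c c' : Char)
    (hk : k.toList.head? = some c) (hk' : k'.toList.head? = some c') (hne : c ≠ c')
    (h : pvCond k line = true) : pvCond k' line = false := by
  simp only [pvCond, Bool.and_eq_true] at h
  rcases h with ⟨h1, h2⟩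
  have hc := pv_head _ _ _ hk h2
  simp only [pvCond, h1, Bool.true_and]
  by_contra hb
  have hb' : PySem.Str.startswith (PySem.Str.strip (PySem.Str.slice line (some 1) none)) k' = true := by
    revert hb; cases PySem.Str.startswith (PySem.Str.strip (PySem.Str.slice line (some 1) none)) k' <;> simp
  have hc' := pv_head _ _ _ hk' hb'
  rw [hc] at hc'
  exact hne (Option.some.inj hc')

lemma pvne12 : pvK1 ≠ pvK2 := by decide
lemma pvne21 : pvK2 ≠ pvK1 := by decide
lemma pvne13 : pvK1 ≠ pvK3 := by decide
lemma pvne31 : pvK3 ≠ pvK1 := by decide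
lemma pvne23 : pvK2 ≠ pvK3 := by decide
lemma pvne32 : pvK3 ≠ pvK2 := by decide

lemma pvInnerAux_eq (b1 b2 b3 : Bool) (line : String) :
    pvInnerAux (pvD b1 b2 b3) line (pvD b1 b2 b3).items
      = pvD (b1 || pvCond pvK1 line) (b2 || pvCond pvK2 line) (b3 || pvCond pvK3 line) := by
  show pvInnerAux (pvD b1 b2 b3) line [(pvK1, b1), (pvK2, b2), (pvK3, b3)]
      = pvD (b1 || pvCond pvK1 line) (b2 || pvCond pvK2 line) (b3 || pvCond pvK3 line)
  cases h1 : pvCond pvK1 line with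
  | true =>
    have h2 := pvCond_pair pvK1 pvK2 line '<' '=' (by decide) (by decide) (by decide) h1
    have h3 := pvCond_pair pvK1 pvK3 line '<' '>' (by decide) (by decide) (by decide) h1
    cases b1 <;> simp [pvInnerAux, h1, h2, h3, pvD, PySem.Dict.insert, pvne12, pvne21, pvne13, pvne31, pvne23, pvne32]
  | false =>
    cases h2 : pvCond pvK2 line with
    | true =>
      have h3 := pvCond_pair pvK2 pvK3 line '=' '>' (by decide) (by decide) (by decide) h2
      cases b2 <;> simp [pvInnerAux, h1, h2, h3, pvD, PySem.Dict.insert, pvne12, pvne21, pvne13, pvne31, pvne23, pvne32]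
    | false =>
      cases h3 : pvCond pvK3 line <;> cases b3 <;>
        simp [pvInnerAux, h1, h2, h3, pvD, PySem.Dict.insert, pvne12, pvne21, pvne13, pvne31, pvne23, pvne32]

lemma pvAllFound_eq (b1 b2 b3 : Bool) : pvAllFound (pvD b1 b2 b3) = (b1 && b2 && b3) := by
  cases b1 <;> cases b2 <;> cases b3 <;> rfl

lemma pvLoopA_eq (lines0 : String) (fb : Bool) (ls : List String) (b1 b2 b3 : Bool)
    (h : (b1 && b2 && b3) = false) :
    pvLoopA lines0 fb ls (pvD b1 b2 b3)
      = if (b1 || ls.any (fun l => pvCond pvK1 (PySem.Str.strip l)))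
          && (b2 || ls.any (fun l => pvCond pvK2 (PySem.Str.strip l)))
          && (b3 || ls.any (fun l => pvCond pvK3 (PySem.Str.strip l)))
        then true
        else if fb then pvFallbackA lines0 [pvK1, pvK2, pvK3] else false := by
  induction ls generalizing b1 b2 b3 with
  | nil => simp [pvLoopA, h, pvD, PySem.Dict.keys]
  | cons l rest ih =>
    simp only [pvLoopA, pvInnerAux_eq, pvAllFound_eq]
    cases hall : (b1 || pvCond pvK1 (PySem.Str.strip l)) &&
        (b2 || pvCond pvK2 (PySem.Str.strip l)) && (b3 || pvCond pvK3 (PySem.Str.strip l)) with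
    | true =>
      simp only [Bool.and_eq_true, Bool.or_eq_true] at hall
      rcases hall with ⟨⟨c1, c2⟩, c3⟩
      rcases c1 with c1 | c1 <;> rcases c2 with c2 | c2 <;> rcases c3 with c3 | c3 <;>
        simp [List.any_cons, c1, c2, c3]
    | false =>
      rw [if_neg (by simp [hall]), ih _ _ _ hall]
      simp [List.any_cons, Bool.or_assoc]
-- ===== VERDICT (by name: the statement is the Claim_ definition above) =====
theorem check_valid_merge_conflict_resolution_py_spec : Claim_equal_check_valid_merge_conflict_resolution_py := by
  intro lines fb _
  show check_valid_merge_conflict_resolution_py lines fb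
      = check_valid_merge_conflict_resolution_py_alt lines fb
  unfold check_valid_merge_conflict_resolution_py check_valid_merge_conflict_resolution_py_alt
  cases hb : lines == "" with
  | true => simp [hb]
  | false =>
    simp only [hb, Bool.false_eq_true, if_false]
    rw [show PySem.Dict.mk [(pvK1, false), (pvK2, false), (pvK3, false)]
          = pvD false false false from rfl,
        pvLoopA_eq lines fb _ false false false rfl]
    simp only [pvRemoved, List.all_cons, List.all_nil, List.any_cons, List.any_nil,
      Bool.false_or]
    cases h1 : ((PySem.Str.split? lines "\n").getD []).any (fun l => pvCond pvK1 (PySem.Str.strip l)) <;>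
    cases h2 : ((PySem.Str.split? lines "\n").getD []).any (fun l => pvCond pvK2 (PySem.Str.strip l)) <;>
    cases h3 : ((PySem.Str.split? lines "\n").getD []).any (fun l => pvCond pvK3 (PySem.Str.strip l)) <;>
    cases hf : fb <;>
    cases i1 : PySem.Str.isIn pvK1 lines <;>
    cases i2 : PySem.Str.isIn pvK2 lines <;>
    cases i3 : PySem.Str.isIn pvK3 lines <;>
      simp only [PySem.Str.isIn_eq] at i1 i2 i3 <;>
      simp [pvFallbackA, i1, i2, i3]
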